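-- pv_equiv track=rewrite | github.com/jack-kelly-12/d3-dashboard-web | backend/processors/add_player_id.py | _is_valid_year_progression
-- ===== SOURCE A (Python) =====
-- from typing import List, Dict, Set, Tuple
--
-- def _is_valid_year_progression(years: List[int], yr_values: List[str]) -> bool:
--     if len(years) <= 1:
--         return True
--
--     yr_map = {'FR': 1, 'SO': 2, 'JR': 3, 'SR': 4}
--     numeric_years = [yr_map.get(yr, 0) for yr in yr_values]
--
--     year_pairs = list(zip(sorted(years), sorted(numeric_years)))
--     for i in range(len(year_pairs)-1):
--         curr_year, curr_yr = year_pairs[i]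
--         next_year, next_yr = year_pairs[i+1]
--
--         if next_year != curr_year + 1:
--             return False
--
--         if next_yr < curr_yr:
--             return False
--
--     return True
-- ===== SOURCE B (Python) =====
-- def _is_valid_year_progression(years, yr_values):
--     # Closed-form check: the sorted years are consecutive integers
--     # iff they are pairwise distinct and span exactly len-1.
--     # (The class-year condition in A is vacuous: it compares a sorted list
--     # with itself pairwise.)
--     if len(years) <= 1:
--         return True
--     return len(set(years)) == len(years) and max(years) - min(years) == len(years) - 1
-- ===== Notes on version B (the rewrite author's own statement) =====
-- stated objective: simpler
-- what changed: Replaced the sort-then-scan over zipped (year, class) pairs by a closed-form single-pass check (years pairwise distinct and max-min == len-1; the class-year comparison in A is vacuous because it compares a sorted list with itself pairwise).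
-- outside the precondition, e.g. on _is_valid_year_progression([1, 3], []): A returns True, B returns False
import Mathlib
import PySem

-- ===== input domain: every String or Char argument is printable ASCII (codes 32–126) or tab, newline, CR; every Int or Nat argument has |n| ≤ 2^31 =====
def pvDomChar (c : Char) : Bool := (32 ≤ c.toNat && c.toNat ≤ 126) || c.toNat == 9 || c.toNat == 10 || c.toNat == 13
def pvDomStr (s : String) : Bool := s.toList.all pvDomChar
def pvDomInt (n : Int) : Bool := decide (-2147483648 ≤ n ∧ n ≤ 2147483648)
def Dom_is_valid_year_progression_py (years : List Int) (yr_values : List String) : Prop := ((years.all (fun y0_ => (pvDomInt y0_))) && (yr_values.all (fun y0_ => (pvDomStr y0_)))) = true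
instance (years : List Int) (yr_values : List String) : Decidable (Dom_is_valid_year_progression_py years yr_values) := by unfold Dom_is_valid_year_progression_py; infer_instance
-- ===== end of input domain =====

-- B replaces A's sort-then-scan over zipped pairs by a closed-form check (distinct years, span = len-1); simpler.


-- ===== PORT A =====
-- A's indexed early-return loop over year_pairs, as structural recursion on the pair list
def pvLoopA : List (Int × Int) → Bool
  | (a, b) :: (c, d) :: t =>
      if c ≠ a + 1 then false
      else if d < b then false
      else pvLoopA ((c, d) :: t)
  | _ => true

def is_valid_year_progression_py (years : List Int) (yr_values : List String) : Bool :=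
  if years.length ≤ 1 then true
  else
    let yr_map : PySem.Dict String Int := PySem.Dict.ofList [("FR", 1), ("SO", 2), ("JR", 3), ("SR", 4)]
    let numeric_years := yr_values.map (fun yr => yr_map.getD yr 0)
    let year_pairs :=
      (PySem.List.sorted years (fun x => x) false).zip
        (PySem.List.sorted numeric_years (fun x => x) false)
    pvLoopA year_pairs

-- ===== PORT B =====
def is_valid_year_progression_py_alt (years : List Int) (yr_values : List String) : Bool :=
  if years.length ≤ 1 then true
  else
    match years with
    | [] => true  -- unreachable under the guard
    | y :: t =>
        decide ((PySem.Set.ofList (y :: t)).length = (y :: t).length) &&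
        decide (t.foldl max y - t.foldl min y = ((y :: t).length : Int) - 1)

-- ===== PRECONDITION & SPEC =====
-- Pre_ excludes calls where yr_values is shorter than years: there A's zip silently truncates
-- the year list and A's answer is an artefact of that truncation.
def Pre_is_valid_year_progression_py (years : List Int) (yr_values : List String) : Prop :=
  years.length ≤ yr_values.length
instance (years : List Int) (yr_values : List String) : Decidable (Pre_is_valid_year_progression_py years yr_values) := by unfold Pre_is_valid_year_progression_py; infer_instance

def pvWitness_is_valid_year_progression_py : List Int × List String := ([2024, 2025], ["FR", "SO"])

def Spec_is_valid_year_progression_py (years : List Int) (yr_values : List String) (out : Bool) : Prop := out = is_valid_year_progression_py_alt years yr_values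
instance (years : List Int) (yr_values : List String) (out : Bool) : Decidable (Spec_is_valid_year_progression_py years yr_values out) := by unfold Spec_is_valid_year_progression_py; infer_instance

-- ===== CLAIM (what is proved, stated in full; the proofs are below) =====
def Claim_equal_is_valid_year_progression_py : Prop := ∀ (years : List Int) (yr_values : List String), Dom_is_valid_year_progression_py years yr_values → Pre_is_valid_year_progression_py years yr_values → Spec_is_valid_year_progression_py years yr_values (is_valid_year_progression_py years yr_values)

-- ===== LEMMAS AND PROOFS =====

-- the year part of A's loop, on its own
def chkY : List Int → Bool
  | a :: c :: t => (c == a + 1) && chkY (c :: t)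
  | _ => true

-- when the second list is ascending and at least as long, A's loop only tests the years
theorem loopA_zip : ∀ (ys ns : List Int), ns.Pairwise (· ≤ ·) → ys.length ≤ ns.length →
    pvLoopA (ys.zip ns) = chkY ys
  | [], _, _, _ => by simp [pvLoopA, chkY]
  | [a], ns, _, h => by
      cases ns with
      | nil => simp at h
      | cons b m => simp [pvLoopA, chkY]
  | a :: c :: t, ns, hp, h => by
      match ns with
      | b :: d :: m =>
        have hbd : b ≤ d := (List.pairwise_cons.mp hp).1 d (by simp)
        have ih := loopA_zip (c :: t) (d :: m) (List.pairwise_cons.mp hp).2 (by simp at h ⊢; omega)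
        simp only [List.zip_cons_cons] at ih ⊢
        by_cases hc : c = a + 1
        · subst hc
          have hstep : pvLoopA ((a, b) :: (a + 1, d) :: t.zip m) = pvLoopA ((a + 1, d) :: t.zip m) := by
            simp [pvLoopA, not_lt.mpr hbd]
          simp [hstep, ih, chkY]
        · simp [pvLoopA, chkY, hc]

theorem chkY_iff : ∀ (ys : List Int), chkY ys = true ↔ ∀ i (_ : i + 1 < ys.length), ys[i+1] = ys[i]'(by omega) + 1
  | [] => by simp [chkY]
  | [a] => by simp [chkY]
  | a :: c :: t => by
      rw [show chkY (a :: c :: t) = ((c == a + 1) && chkY (c :: t)) from rfl]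
      simp only [Bool.and_eq_true, beq_iff_eq, chkY_iff (c :: t)]
      constructor
      · rintro ⟨h1, h2⟩ i hi
        cases i with
        | zero => simpa using h1
        | succ j => simpa using h2 j (by simp at hi ⊢; omega)
      · intro h
        exact ⟨by simpa using h 0 (by simp), fun j hj => by simpa using h (j + 1) (by simp at hj ⊢; omega)⟩

theorem consec_affine (ys : List Int) (h : ∀ i (_ : i + 1 < ys.length), ys[i+1] = ys[i]'(by omega) + 1) :
    ∀ i (hi : i < ys.length), ys[i] = ys[0]'(by omega) + (i : ℤ) := by
  intro i
  induction i with
  | zero => intro hi; simp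
  | succ j ih =>
      intro hi
      have hj := ih (by omega)
      have hs := h j (by omega)
      push_cast
      omega

theorem gap (ys : List Int) (hp : ys.Pairwise (· < ·)) (i j : ℕ) (hij : i ≤ j) (hj : j < ys.length) :
    ys[i]'(by omega) + ((j : ℤ) - (i : ℤ)) ≤ ys[j] := by
  induction j, hij using Nat.le_induction with
  | base => simp
  | succ n hn ih =>
      have h1 : ys[n]'(by omega) < ys[n+1]'hj :=
        List.pairwise_iff_getElem.mp hp n (n + 1) (by omega) hj (by omega)
      have h2 := ih (by omega)
      push_cast at h2 ⊢
      omega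

theorem ofList_length_eq_iff (xs : List Int) :
    (PySem.Set.ofList xs).length = xs.length ↔ xs.Nodup := by
  have h1 : (PySem.Set.ofList xs).toFinset = xs.toFinset := by
    ext z; simp [List.mem_toFinset, PySem.Set.mem_ofList]
  have h2 : (PySem.Set.ofList xs).length = xs.dedup.length := by
    rw [← List.toFinset_card_of_nodup (PySem.Set.nodup_ofList xs), h1, List.card_toFinset]
  rw [h2]
  constructor
  · intro h
    have he := (List.dedup_sublist xs).eq_of_length h
    simpa [he] using xs.nodup_dedup
  · intro h; rw [List.dedup_eq_self.mpr h]

-- the sorted-and-consecutive check equals the closed form: distinct and span = len-1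
theorem chkY_eq_closed (ys : List Int) (hp : ys.Pairwise (· ≤ ·)) (hL : 2 ≤ ys.length) :
    chkY ys = (decide ys.Nodup &&
      decide (ys[ys.length - 1]'(by omega) - ys[0]'(by omega) = (ys.length : ℤ) - 1)) := by
  rw [Bool.eq_iff_iff]
  simp only [Bool.and_eq_true, decide_eq_true_eq, chkY_iff]
  constructor
  · intro h
    have haff := consec_affine ys h
    have hlt : ys.Pairwise (· < ·) := by
      rw [List.pairwise_iff_getElem]
      intro i j hi hj hij
      rw [haff i hi, haff j hj]
      have : (i : ℤ) < (j : ℤ) := by exact_mod_cast hij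
      omega
    refine ⟨hlt.imp ne_of_lt, ?_⟩
    rw [haff (ys.length - 1) (by omega), haff 0 (by omega)]
    push_cast [Nat.cast_sub (by omega : 1 ≤ ys.length)]
    ring
  · rintro ⟨hnd, hspan⟩
    have hlt : ys.Pairwise (· < ·) := by
      rw [List.pairwise_iff_getElem] at hp ⊢
      intro i j hi hj hij
      have h1 := hp i j hi hj hij
      have h2 : ys[i] ≠ ys[j] := by
        intro he
        have : (⟨i, hi⟩ : Fin ys.length) = ⟨j, hj⟩ :=
          List.nodup_iff_injective_getElem.mp hnd (by simpa using he)
        simp at this; omega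
      exact lt_of_le_of_ne h1 h2
    intro i hi
    have g1 := gap ys hlt 0 i (by omega) (by omega)
    have g2 := gap ys hlt (i + 1) (ys.length - 1) (by omega) (by omega)
    have g3 := gap ys hlt i (i + 1) (by omega) hi
    push_cast [Nat.cast_sub (by omega : 1 ≤ ys.length)] at g1 g2 g3 hspan
    omega

-- foldl max / min over the original list are the last / first element of the sorted list
theorem foldl_max_eq_sorted_last (y : Int) (t : List Int)
    (L : ℕ) (hL : L = (PySem.List.sorted (y :: t) (fun x => x) false).length) (h2 : 2 ≤ L) :
    t.foldl max y = (PySem.List.sorted (y :: t) (fun x => x) false)[L - 1]'(by omega) := by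
  set ys := PySem.List.sorted (y :: t) (fun x => x) false with hys
  have hmx := PySem.List.max?_id_cons (x := y) (t := t)
  have hmem : t.foldl max y ∈ (y :: t) := PySem.List.max?_mem hmx
  have hall : ∀ z ∈ (y :: t), z ≤ t.foldl max y := fun z hz => PySem.List.max?_isMax hmx z hz
  have hperm : ys.Perm (y :: t) := PySem.List.sorted_perm ..
  apply le_antisymm
  · -- foldl max ∈ ys, and every ys[i] ≤ ys[L-1]
    have hmem' : t.foldl max y ∈ ys := hperm.mem_iff.mpr hmem
    obtain ⟨i, hi, hei⟩ := List.mem_iff_getElem.mp hmem'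
    rw [← hei]
    have := PySem.List.sorted_id_getElem_mono (y :: t) (p := i) (q := L - 1) (by omega) (by omega)
    simpa [← hys] using this
  · exact hall _ (hperm.mem_iff.mp (ys.getElem_mem (by omega)))

theorem foldl_min_eq_sorted_head (y : Int) (t : List Int)
    (L : ℕ) (hL : L = (PySem.List.sorted (y :: t) (fun x => x) false).length) (h2 : 2 ≤ L) :
    t.foldl min y = (PySem.List.sorted (y :: t) (fun x => x) false)[0]'(by omega) := by
  set ys := PySem.List.sorted (y :: t) (fun x => x) false with hys
  have hmn := PySem.List.min?_id_cons (x := y) (t := t)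
  have hmem : t.foldl min y ∈ (y :: t) := PySem.List.min?_mem hmn
  have hall : ∀ z ∈ (y :: t), t.foldl min y ≤ z := fun z hz => PySem.List.min?_isMin hmn z hz
  have hperm : ys.Perm (y :: t) := PySem.List.sorted_perm ..
  apply le_antisymm
  · exact hall _ (hperm.mem_iff.mp (ys.getElem_mem (by omega)))
  · have hmem' : t.foldl min y ∈ ys := hperm.mem_iff.mpr hmem
    obtain ⟨i, hi, hei⟩ := List.mem_iff_getElem.mp hmem'
    rw [← hei]
    have := PySem.List.sorted_id_getElem_mono (y :: t) (p := 0) (q := i) (by omega) (by omega)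
    simpa [← hys] using this

-- ===== VERDICT (by name: the statement is the Claim_ definition above) =====
theorem is_valid_year_progression_py_spec : Claim_equal_is_valid_year_progression_py := by
  intro years yr_values _ hpre
  unfold Spec_is_valid_year_progression_py
  by_cases hl : years.length ≤ 1
  · simp [is_valid_year_progression_py, is_valid_year_progression_py_alt, hl]
  · cases years with
    | nil => simp at hl
    | cons y t =>
      set nums := yr_values.map
        (fun yr => (PySem.Dict.ofList [("FR", (1:Int)), ("SO", 2), ("JR", 3), ("SR", 4)]).getD yr 0)
        with hnums
      set ys := PySem.List.sorted (y :: t) (fun x => x) false with hys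
      set ns := PySem.List.sorted nums (fun x => x) false with hns
      have hlen : ys.length = (y :: t).length := PySem.List.length_sorted ..
      have hlenn : ns.length = yr_values.length := by
        rw [hns, PySem.List.length_sorted, hnums, List.length_map]
      have hL2 : 2 ≤ ys.length := by rw [hlen]; simp only [List.length_cons] at hl ⊢; omega
      have hpns : ns.Pairwise (· ≤ ·) := by
        have := PySem.List.sorted_pairwise (xs := nums) (key := fun x => x)
        simpa using this
      have hpys : ys.Pairwise (· ≤ ·) := by
        have := PySem.List.sorted_pairwise (xs := y :: t) (key := fun x => x)
        simpa using this
      have hA : is_valid_year_progression_py (y :: t) yr_values = chkY ys := by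
        simp only [is_valid_year_progression_py, if_neg hl]
        exact loopA_zip ys ns hpns (by rw [hlen, hlenn]; exact hpre)
      rw [hA, chkY_eq_closed ys hpys hL2]
      simp only [is_valid_year_progression_py_alt, if_neg hl]
      rw [foldl_max_eq_sorted_last y t ys.length rfl hL2,
          foldl_min_eq_sorted_head y t ys.length rfl hL2]
      have hnd : ys.Nodup ↔ (y :: t).Nodup := (PySem.List.sorted_perm ..).nodup_iff
      simp only [← hys]
      rw [show ((y :: t).length : ℤ) = (ys.length : ℤ) by rw [hlen]]
      congr 1
      · exact decide_eq_decide.mpr (hnd.trans (ofList_length_eq_iff (y :: t)).symm)
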